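-- pv_equiv track=rewrite | github.com/yonama/MachineLearningAPI | components/aprioricompo.py | __create_idata
-- ===== SOURCE A (Python) =====
-- def __create_idata(testdata,items):
--     idata={}
--     num=len(testdata)
--     for i in items:
--         for j in range(num):
--             if i in testdata[j]:
--                 if i in idata:
--                     idata[i].append(j)
--                 else:
--                     idata[i]=[j]
--     return idata,num
-- ===== SOURCE B (Python) =====
-- def __create_idata(testdata, items):
--     # One pass over the transactions bucketing item -> transaction indices,
--     # then emit in the order of `items` to reproduce A's key order exactly.
--     num = len(testdata)
--     buckets = {}
--     for j, txn in enumerate(testdata):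
--         for x in dict.fromkeys(txn):  # distinct elements, each index recorded once
--             buckets.setdefault(x, []).append(j)
--     idata = {}
--     for i in items:
--         occ = buckets.get(i, [])
--         if occ:
--             if i in idata:
--                 idata[i].extend(occ)
--             else:
--                 idata[i] = list(occ)
--     return idata, num
-- ===== Notes on version B (the rewrite author's own statement) =====
-- stated objective: faster
-- what changed: Instead of scanning every transaction once per item (items outer, transactions inner), B makes a single pass over the transactions building an item->indices bucket dict, then assembles the result in items order to preserve key order and duplicate-item behaviour.
import Mathlib
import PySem

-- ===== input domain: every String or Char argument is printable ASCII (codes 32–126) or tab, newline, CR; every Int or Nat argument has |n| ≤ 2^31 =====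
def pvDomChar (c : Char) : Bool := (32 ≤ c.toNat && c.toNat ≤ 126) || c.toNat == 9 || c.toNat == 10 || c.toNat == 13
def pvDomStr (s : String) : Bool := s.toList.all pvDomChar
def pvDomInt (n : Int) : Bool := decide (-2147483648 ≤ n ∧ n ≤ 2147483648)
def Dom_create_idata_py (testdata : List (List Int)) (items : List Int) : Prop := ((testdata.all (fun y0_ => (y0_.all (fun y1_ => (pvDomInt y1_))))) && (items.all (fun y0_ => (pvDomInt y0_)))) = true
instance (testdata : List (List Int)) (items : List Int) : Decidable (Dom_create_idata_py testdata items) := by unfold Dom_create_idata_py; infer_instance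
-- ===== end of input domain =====

-- B replaces A's per-item scan of every transaction by a single bucketing pass
-- over the transactions followed by assembly in `items` order (objective: faster).

-- ===== PORT A =====
-- literal port: for i in items / for j in range(num) / if i in testdata[j] / append-or-create
def create_idata_py (testdata : List (List Int)) (items : List Int) : (List (Int × List Int)) × Int :=
  let num : Int := testdata.length
  let idata : PySem.Dict Int (List Int) :=
    items.foldl (fun idata i =>
      (PySem.List.pyRange 0 num 1).foldl (fun idata j =>
        if (PySem.List.pyGetD testdata j []).contains i then  -- j is always in range
          if idata.contains i then idata.modify i [] (· ++ [j])   -- idata[i].append(j)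
          else idata.insert i [j]
        else idata) idata) PySem.Dict.empty
  (idata.items, num)

-- ===== PORT B =====
-- literal port of Source B: bucket pass over enumerate(testdata) (dict.fromkeys = dedup,
-- setdefault(x, []).append(j) = modify x [] (· ++ [j])), then assembly in items order
def create_idata_py_alt (testdata : List (List Int)) (items : List Int) : (List (Int × List Int)) × Int :=
  let num : Int := testdata.length
  let buckets : PySem.Dict Int (List Int) :=
    (PySem.List.enumerate testdata 0).foldl (fun b p =>
      (PySem.List.dedup p.2).foldl (fun b x => b.modify x [] (· ++ [p.1])) b) PySem.Dict.empty
  let idata : PySem.Dict Int (List Int) :=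
    items.foldl (fun idata i =>
      let occ := buckets.getD i []
      if occ.isEmpty then idata
      else if idata.contains i then idata.modify i [] (· ++ occ)
      else idata.insert i occ) PySem.Dict.empty
  (idata.items, num)

-- ===== PRECONDITION & SPEC =====
def Spec_create_idata_py (testdata : List (List Int)) (items : List Int) (out : (List (Int × List Int)) × Int) : Prop := out = create_idata_py_alt testdata items
instance (testdata : List (List Int)) (items : List Int) (out : (List (Int × List Int)) × Int) : Decidable (Spec_create_idata_py testdata items out) := by unfold Spec_create_idata_py; infer_instance

-- ===== CLAIM (what is proved, stated in full; the proofs are below) =====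
def Claim_equal_create_idata_py : Prop := ∀ (testdata : List (List Int)) (items : List Int), Dom_create_idata_py testdata items → Spec_create_idata_py testdata items (create_idata_py testdata items)

-- ===== LEMMAS AND PROOFS =====

-- the indices (in order) of the enumerated transactions containing i
def occOf (L : List (Int × List Int)) (i : Int) : List Int :=
  (L.filter (fun p => decide (i ∈ p.2))).map (·.1)

-- the net effect of appending a whole run of indices for one item to the dict
def mergeStep (d : PySem.Dict Int (List Int)) (i : Int) (occ : List Int) : PySem.Dict Int (List Int) :=
  if occ.isEmpty then d
  else if d.contains i then d.modify i [] (· ++ occ)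
  else d.insert i occ

theorem mergeStep_nil (d : PySem.Dict Int (List Int)) (i : Int) : mergeStep d i [] = d := by
  simp [mergeStep]

theorem mergeStep_cons (d : PySem.Dict Int (List Int)) (i j : Int) (occ : List Int) :
    mergeStep d i (j :: occ)
      = if d.contains i then d.modify i [] (· ++ (j :: occ)) else d.insert i (j :: occ) := by
  simp [mergeStep]

theorem occOf_cons_mem (p : Int × List Int) (rest : List (Int × List Int)) (i : Int)
    (h : i ∈ p.2) : occOf (p :: rest) i = p.1 :: occOf rest i := by
  simp [occOf, h]

theorem occOf_cons_not_mem (p : Int × List Int) (rest : List (Int × List Int)) (i : Int)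
    (h : i ∉ p.2) : occOf (p :: rest) i = occOf rest i := by
  simp [occOf, h]

theorem dict_modify_modify (d : PySem.Dict Int (List Int)) (k : Int) (f g : List Int → List Int) :
    (d.modify k [] f).modify k [] g = d.modify k [] (fun v => g (f v)) := by
  simp [PySem.Dict.modify, PySem.Dict.getD_insert_self, PySem.Dict.insert_insert_self]

theorem dict_insert_modify (d : PySem.Dict Int (List Int)) (k : Int) (v : List Int) (g : List Int → List Int) :
    (d.insert k v).modify k [] g = d.insert k (g v) := by
  simp [PySem.Dict.modify, PySem.Dict.getD_insert_self, PySem.Dict.insert_insert_self]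

-- A's inner loop over an explicit (index, transaction) list equals one mergeStep
theorem innerA_eq_mergeStep (i : Int) :
    ∀ (L : List (Int × List Int)) (d : PySem.Dict Int (List Int)),
    L.foldl (fun d p =>
      if p.2.contains i then
        if d.contains i then d.modify i [] (· ++ [p.1]) else d.insert i [p.1]
      else d) d = mergeStep d i (occOf L i) := by
  intro L
  induction L with
  | nil => intro d; simp [occOf, mergeStep]
  | cons p rest ih =>
    intro d
    by_cases hp : i ∈ p.2
    · have hp' : p.2.contains i = true := by simpa using hp
      simp only [List.foldl_cons, hp', if_pos]
      rw [ih, occOf_cons_mem p rest i hp, mergeStep_cons]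
      by_cases hc : d.contains i
      · simp only [hc, if_pos]
        have hcontains : (d.modify i [] (· ++ [p.1])).contains i := by
          simp [PySem.Dict.modify, PySem.Dict.contains_insert_self]
        cases hr : occOf rest i with
        | nil => rw [mergeStep_nil]
        | cons a tl =>
          rw [mergeStep_cons, if_pos hcontains, dict_modify_modify]
          congr 1
          funext v
          simp
      · simp only [hc, Bool.false_eq_true, if_false]
        have hcontains : (d.insert i [p.1]).contains i := PySem.Dict.contains_insert_self d i [p.1]
        cases hr : occOf rest i with
        | nil => rw [mergeStep_nil]
        | cons a tl =>
          rw [mergeStep_cons, if_pos hcontains, dict_insert_modify]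
          simp
    · have hp' : p.2.contains i = false := by simpa using hp
      simp only [List.foldl_cons, hp', Bool.false_eq_true, if_false]
      rw [ih, occOf_cons_not_mem p rest i hp]

-- range-indexed loop over testdata = loop over enumerate(testdata)
theorem enumerate_append (xs ys : List (List Int)) (s : Int) :
    PySem.List.enumerate (xs ++ ys) s
      = PySem.List.enumerate xs s ++ PySem.List.enumerate ys (s + xs.length) := by
  induction xs generalizing s with
  | nil => simp [PySem.List.enumerate_nil]
  | cons x xs ih =>
    simp [PySem.List.enumerate_cons, ih]
    ring_nf

theorem foldl_pyRange_eq_foldl_enumerate {β : Type}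
    (g : β → Int → List Int → β) (xs : List (List Int)) (d : β) :
    (PySem.List.pyRange 0 (xs.length : Int) 1).foldl
        (fun d j => g d j (PySem.List.pyGetD xs j [])) d
      = (PySem.List.enumerate xs 0).foldl (fun d p => g d p.1 p.2) d := by
  induction xs using List.reverseRecOn generalizing d with
  | nil => simp [PySem.List.enumerate_nil]
  | append_singleton xs x ih =>
    have hlen : ((xs ++ [x]).length : Int) = (xs.length : Int) + 1 := by simp
    rw [hlen, PySem.List.pyRange_one_succ_right (Int.natCast_nonneg _), List.foldl_append]
    rw [enumerate_append, List.foldl_append]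
    have hmid : (PySem.List.pyRange 0 (xs.length : Int) 1).foldl
        (fun d j => g d j (PySem.List.pyGetD (xs ++ [x]) j [])) d
        = (PySem.List.pyRange 0 (xs.length : Int) 1).foldl
        (fun d j => g d j (PySem.List.pyGetD xs j [])) d := by
      apply PySem.List.foldl_congr_mem
      intro d' j hj
      rw [PySem.List.mem_pyRange_one] at hj
      congr 1
      rw [PySem.List.pyGetD_eq_getElem _ _ hj.1 (by simp; omega),
          PySem.List.pyGetD_eq_getElem _ _ hj.1 (by simpa using hj.2)]
      rw [List.getElem_append_left]
    rw [hmid, ih]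
    have h2 : PySem.List.pyGetD (xs ++ [x]) ((xs.length : Int)) [] = x := by
      rw [PySem.List.pyGetD_eq_getElem _ _ (Int.natCast_nonneg _) (by simp)]
      simp
    simp [h2]

-- a Nodup list filtered by equality with i is [i] or []
theorem filter_beq_of_nodup (l : List Int) (i : Int) (h : l.Nodup) :
    l.filter (· == i) = if i ∈ l then [i] else [] := by
  induction l with
  | nil => simp
  | cons x xs ih =>
    rw [List.nodup_cons] at h
    by_cases hx : x = i
    · subst hx
      simp [ih h.2, h.1]
    · simp [hx, ih h.2, Ne.symm hx]

-- the bucket pass: lookup of i yields exactly the indices of transactions containing i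
theorem buckets_getD (i : Int) :
    ∀ (L : List (Int × List Int)) (d : PySem.Dict Int (List Int)),
    (L.foldl (fun b p =>
        (PySem.List.dedup p.2).foldl (fun b x => b.modify x [] (· ++ [p.1])) b) d).getD i []
      = d.getD i [] ++ occOf L i := by
  intro L
  induction L with
  | nil => simp [occOf]
  | cons p rest ih =>
    intro d
    simp only [List.foldl_cons]
    rw [ih]
    have hinner : ((PySem.List.dedup p.2).foldl (fun b x => b.modify x [] (· ++ [p.1])) d).getD i []
        = d.getD i [] ++ (if i ∈ p.2 then [p.1] else []) := by
      have hmap : (PySem.List.dedup p.2).foldl (fun b x => b.modify x [] (· ++ [p.1])) d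
          = ((PySem.List.dedup p.2).map (fun x => (x, p.1))).foldl
              (fun b q => b.modify q.1 [] (· ++ [q.2])) d := by
        rw [List.foldl_map]
      rw [hmap, PySem.Dict.getD_foldl_modify_append]
      congr 1
      rw [List.filter_map]
      have hcomp : ((fun q : Int × Int => q.1 == i) ∘ fun x => (x, p.1)) = (· == i) := rfl
      rw [hcomp, filter_beq_of_nodup _ _ (PySem.List.nodup_dedup p.2)]
      by_cases hm : i ∈ p.2
      · simp [hm]
      · simp [hm]
    rw [hinner]
    by_cases hp : i ∈ p.2
    · rw [occOf_cons_mem p rest i hp]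
      simp [hp, List.append_assoc]
    · rw [occOf_cons_not_mem p rest i hp]
      simp [hp]

-- A's inner range loop in the port's exact shape
theorem innerA_pyRange (testdata : List (List Int)) (i : Int) (d : PySem.Dict Int (List Int)) :
    (PySem.List.pyRange 0 (testdata.length : Int) 1).foldl (fun idata j =>
        if (PySem.List.pyGetD testdata j []).contains i then
          if idata.contains i then idata.modify i [] (· ++ [j])
          else idata.insert i [j]
        else idata) d
      = mergeStep d i (occOf (PySem.List.enumerate testdata 0) i) := by
  have h := foldl_pyRange_eq_foldl_enumerate
    (fun d j t => if t.contains i then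
      (if d.contains i then d.modify i [] (· ++ [j]) else d.insert i [j]) else d) testdata d
  exact h.trans (innerA_eq_mergeStep i (PySem.List.enumerate testdata 0) d)

theorem create_idata_py_eq (testdata : List (List Int)) (items : List Int) :
    create_idata_py testdata items = create_idata_py_alt testdata items := by
  unfold create_idata_py create_idata_py_alt
  dsimp only
  congr 1
  congr 1
  apply PySem.List.foldl_congr_mem
  intro acc i _
  rw [innerA_pyRange testdata i acc]
  have hb : ((PySem.List.enumerate testdata 0).foldl (fun b p =>
      (PySem.List.dedup p.2).foldl (fun b x => b.modify x [] (· ++ [p.1])) b)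
      PySem.Dict.empty).getD i [] = occOf (PySem.List.enumerate testdata 0) i := by
    rw [buckets_getD]; simp
  rw [hb]
  simp only [mergeStep]

-- ===== VERDICT (by name: the statement is the Claim_ definition above) =====
theorem create_idata_py_spec : Claim_equal_create_idata_py := by
  intro testdata items _
  unfold Spec_create_idata_py
  exact create_idata_py_eq testdata items
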